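-- pv_equiv track=rewrite | github.com/doorBW/algorithm_practice | hacker_rank/python/017.Birthday_Chocolate_180516/solution.py | solve
-- ===== SOURCE A (Python) =====
-- def solve(n, s, d, m):
--     # Complete this function
--     start = 0
--     start_temp = 0
--     result = 0
--     for _ in range(n):
--         sum_temp = 0
--         start_temp = start
--         for _ in range(m):
--             sum_temp += s[start_temp]
--             start_temp += 1
--             if start_temp >= n:
--                 break
--         if sum_temp == d:
--             result += 1
--         start += 1
--     return result
-- ===== SOURCE B (Python) =====
-- def solve(n, s, d, m):
--     # Prefix sums: O(n + m-independent) single pass; each (possibly end-truncated)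
--     # window sum is a difference of two prefix sums.
--     if n <= 0:
--         return 0
--     if m <= 0:
--         # every window is empty, so each of the n windows sums to 0
--         return n if d == 0 else 0
--     pre = [0]
--     for x in s[:n]:
--         pre.append(pre[-1] + x)
--     count = 0
--     for i in range(n):
--         j = min(i + m, n)
--         if pre[j] - pre[i] == d:
--             count += 1
--     return count
-- ===== Notes on version B (the rewrite author's own statement) =====
-- stated objective: faster
-- what changed: Replaces the nested re-summation of each window by a one-pass prefix-sum array, so every (end-truncated) window sum is one subtraction.
import Mathlib
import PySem

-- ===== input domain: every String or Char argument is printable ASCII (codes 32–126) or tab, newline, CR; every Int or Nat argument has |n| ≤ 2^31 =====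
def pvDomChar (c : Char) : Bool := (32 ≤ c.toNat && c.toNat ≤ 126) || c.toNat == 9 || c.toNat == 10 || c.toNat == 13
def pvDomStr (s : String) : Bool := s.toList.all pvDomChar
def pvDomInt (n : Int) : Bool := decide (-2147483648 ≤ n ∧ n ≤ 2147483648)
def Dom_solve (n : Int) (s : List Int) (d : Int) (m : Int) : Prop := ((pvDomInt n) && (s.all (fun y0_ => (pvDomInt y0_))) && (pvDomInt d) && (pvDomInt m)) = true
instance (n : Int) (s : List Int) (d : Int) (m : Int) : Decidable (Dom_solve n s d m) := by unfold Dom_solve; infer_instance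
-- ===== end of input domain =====

-- B replaces A's per-window re-summation by a prefix-sum array (one subtraction per window).

-- ===== PORT A =====
-- inner 'for _ in range(m)' loop with its early break: state (sum_temp, start_temp)
def solveInner (s : List Int) (n : Int) : Nat → Int → Int → Int × Int
  | 0, st, acc => (acc, st)
  | k+1, st, acc =>
    let acc' := acc + PySem.List.pyGetD s st 0
    let st' := st + 1
    if n ≤ st' then (acc', st') else solveInner s n k st' acc'

def solve (n : Int) (s : List Int) (d : Int) (m : Int) : Int :=
  ((PySem.List.pyRange 0 n 1).foldl (fun (p : Int × Int) _ =>
      let sum_temp := (solveInner s n m.toNat p.1 0).1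
      (p.1 + 1, if sum_temp = d then p.2 + 1 else p.2)) (0, 0)).2

-- ===== PORT B =====
def solve_alt (n : Int) (s : List Int) (d : Int) (m : Int) : Int :=
  if n ≤ 0 then 0
  else if m ≤ 0 then (if d = 0 then n else 0)
  else
    let pre := (PySem.List.slice s none (some n)).foldl
      (fun acc x => acc ++ [PySem.List.pyGetD acc (-1) 0 + x]) [(0 : Int)]
    (PySem.List.pyRange 0 n 1).foldl (fun cnt i =>
      let j := min (i + m) n
      if PySem.List.pyGetD pre j 0 - PySem.List.pyGetD pre i 0 = d then cnt + 1 else cnt) 0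

-- ===== PRECONDITION & SPEC =====
-- A raises IndexError exactly when 1 ≤ n, 1 ≤ m and n > len(s); Pre_ excludes only those inputs.
def Pre_solve (n : Int) (s : List Int) (d : Int) (m : Int) : Prop :=
  1 ≤ n → 1 ≤ m → n ≤ (s.length : Int)
instance (n : Int) (s : List Int) (d : Int) (m : Int) : Decidable (Pre_solve n s d m) := by unfold Pre_solve; infer_instance

def pvWitness_solve : Int × List Int × Int × Int := (3, [1, 2, 1], 3, 2)

def Spec_solve (n : Int) (s : List Int) (d : Int) (m : Int) (out : Int) : Prop := out = solve_alt n s d m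
instance (n : Int) (s : List Int) (d : Int) (m : Int) (out : Int) : Decidable (Spec_solve n s d m out) := by unfold Spec_solve; infer_instance

-- ===== CLAIM (what is proved, stated in full; the proofs are below) =====
def Claim_equal_solve : Prop := ∀ (n : Int) (s : List Int) (d : Int) (m : Int), Dom_solve n s d m → Pre_solve n s d m → Spec_solve n s d m (solve n s d m)

-- ===== LEMMAS AND PROOFS =====

-- the common specification: (truncated) window sum at start i, and the number of starts whose window sums to d
def wsum (s : List Int) (N M i : Nat) : Int := ((s.drop i).take (min (i + M) N - i)).sum

def wcount (s : List Int) (N M : Nat) (d : Int) : Int :=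
  ((List.range N).countP (fun i => decide (wsum s N M i = d)) : Int)

-- A's inner loop computes the truncated window sum
theorem solveInner_eq (s : List Int) (n : Int) (hn : n ≤ (s.length : Int)) :
    ∀ (k : Nat) (st acc : Int), 0 ≤ st → st < n →
      (solveInner s n k st acc).1 = acc + wsum s n.toNat k st.toNat := by
  intro k
  induction k with
  | zero =>
    intro st acc h0 hlt
    have h : min (st.toNat + 0) n.toNat - st.toNat = 0 := by omega
    simp [solveInner, wsum, h]
  | succ k ih =>
    intro st acc h0 hlt
    have hstlen : st.toNat < s.length := by omega
    have hget : PySem.List.pyGetD s st 0 = s[st.toNat] :=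
      PySem.List.pyGetD_eq_getElem s 0 h0 (by exact_mod_cast lt_of_lt_of_le hlt hn)
    have hdrop : s.drop st.toNat = s[st.toNat] :: s.drop (st.toNat + 1) :=
      List.drop_eq_getElem_cons hstlen
    by_cases hbr : n ≤ st + 1
    · -- break: last element of the array, window has exactly one element
      have hwin : min (st.toNat + (k + 1)) n.toNat - st.toNat = 1 := by omega
      have h1 : (List.take 1 (List.drop st.toNat s)).sum = s[st.toNat] := by
        rw [hdrop, List.take_succ_cons, List.take_zero, List.sum_cons, List.sum_nil, add_zero]
      simp [solveInner, hbr, hget, wsum, hwin, h1]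
    · have hlt' : st + 1 < n := by omega
      have ht1 : (st + 1).toNat = st.toNat + 1 := by omega
      simp only [solveInner]
      rw [if_neg hbr, ih (st + 1) (acc + PySem.List.pyGetD s st 0) (by omega) hlt', hget, ht1]
      have hc : min (st.toNat + (k + 1)) n.toNat - st.toNat
          = (min (st.toNat + 1 + k) n.toNat - (st.toNat + 1)) + 1 := by omega
      rw [wsum, wsum, hc, hdrop, List.take_succ_cons]
      simp
      ring

-- A's outer loop: general invariant (start counter a, result r), over any iteration list
theorem loopA_general (s : List Int) (n d : Int) (M : Nat) :
    ∀ (l : List Int) (a r : Int),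
      (l.foldl (fun (p : Int × Int) (_ : Int) =>
          (p.1 + 1, if (solveInner s n M p.1 0).1 = d then p.2 + 1 else p.2)) (a, r))
        = (a + l.length,
           r + ((((List.range l.length).countP
                  (fun j : Nat => decide ((solveInner s n M (a + (j : Int)) 0).1 = d))) : Nat) : Int)) := by
  intro l
  induction l with
  | nil => intro a r; simp
  | cons x xs ih =>
    intro a r
    simp only [List.foldl_cons, List.length_cons, ih]
    rw [List.range_succ_eq_map, Prod.mk.injEq]
    constructor
    · push_cast; ring
    · rw [List.countP_cons, List.countP_map]
      have hsh : (List.range xs.length).countP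
            ((fun j : Nat => decide ((solveInner s n M (a + (j : Int)) 0).1 = d)) ∘ Nat.succ)
          = (List.range xs.length).countP
            (fun j : Nat => decide ((solveInner s n M (a + 1 + (j : Int)) 0).1 = d)) := by
        apply List.countP_congr
        intro j _
        simp only [Function.comp_apply]
        constructor <;> · intro h; simpa [show a + ((j : Int) + 1) = a + 1 + (j : Int) by ring,
          Nat.succ_eq_add_one] using h
      rw [hsh]
      by_cases hP : (solveInner s n M a 0).1 = d <;> simp [hP] <;> push_cast <;> ring

-- A equals the window count
theorem solve_eq_wcount (n : Int) (s : List Int) (d : Int) (m : Int)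
    (hn : 1 ≤ m → n ≤ (s.length : Int)) (hpos : 0 < n) :
    solve n s d m = wcount s n.toNat m.toNat d := by
  unfold solve
  rw [loopA_general]
  simp only [wcount, PySem.List.length_pyRange_one]
  rw [show ((n : Int) - 0).toNat = n.toNat by omega]
  rw [zero_add]
  congr 1
  apply List.countP_congr
  intro j hj
  have hjN : j < n.toNat := List.mem_range.mp hj
  by_cases hm : 1 ≤ m
  · have h := solveInner_eq s n (hn hm) m.toNat (j : Int) 0 (by omega) (by omega)
    simp only [zero_add, h, Int.toNat_natCast]
  · have hM : m.toNat = 0 := by omega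
    have hw : min (j + m.toNat) n.toNat - j = 0 := by omega
    simp [hM, solveInner, wsum, hw]

-- B's prefix list
def presums (c : Int) : List Int → List Int
  | [] => []
  | x :: xs => (c + x) :: presums (c + x) xs

theorem fold_presums (t : List Int) :
    ∀ (acc : List Int) (h : acc ≠ []),
      t.foldl (fun acc x => acc ++ [PySem.List.pyGetD acc (-1) 0 + x]) acc
        = acc ++ presums (acc.getLast h) t := by
  induction t with
  | nil => intro acc h; simp [presums]
  | cons x xs ih =>
    intro acc h
    have hg : PySem.List.pyGetD acc (-1) 0 = acc.getLast h := PySem.List.pyGetD_neg_one acc 0 h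
    simp only [List.foldl_cons, hg]
    rw [ih (acc ++ [acc.getLast h + x]) (by simp)]
    simp [presums]

theorem presums_get (t : List Int) :
    ∀ (c : Int) (k : Nat), k ≤ t.length →
      (c :: presums c t).getD k 0 = c + (t.take k).sum := by
  induction t with
  | nil =>
    intro c k hk
    have : k = 0 := by simpa using hk
    simp [this]
  | cons x xs ih =>
    intro c k hk
    cases k with
    | zero => simp
    | succ k =>
      simp only [presums, List.getD_cons_succ, List.take_succ_cons, List.sum_cons]
      rw [ih (c + x) k (by simpa using hk)]
      ring

-- generic counting fold (B's counting loop)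
theorem foldl_count_int (P : Int → Prop) [DecidablePred P] :
    ∀ (l : List Int) (a : Int),
      l.foldl (fun cnt i => if P i then cnt + 1 else cnt) a
        = a + (((l.countP (fun i => decide (P i))) : Nat) : Int) := by
  intro l
  induction l with
  | nil => intro a; simp
  | cons x xs ih =>
    intro a
    rw [List.foldl_cons, ih, List.countP_cons]
    by_cases hP : P x <;> simp [hP] <;> push_cast <;> ring

-- B equals the window count
theorem solve_alt_eq_wcount (n : Int) (s : List Int) (d : Int) (m : Int)
    (hn : n ≤ (s.length : Int)) (hpos : 0 < n) (hm : 0 < m) :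
    solve_alt n s d m = wcount s n.toNat m.toNat d := by
  unfold solve_alt
  rw [if_neg (by omega), if_neg (by omega)]
  rw [PySem.List.slice_to s (by omega)]
  set t : List Int := s.take n.toNat with ht
  have htlen : t.length = n.toNat := by
    rw [ht, List.length_take]; omega
  have hpre : t.foldl (fun acc x => acc ++ [PySem.List.pyGetD acc (-1) 0 + x]) [(0:Int)]
      = (0 : Int) :: presums 0 t := by
    rw [fold_presums t [(0:Int)] (by simp)]
    simp
  rw [hpre]
  show (PySem.List.pyRange 0 n 1).foldl (fun cnt i =>
      if PySem.List.pyGetD ((0 : Int) :: presums 0 t) (min (i + m) n) 0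
           - PySem.List.pyGetD ((0 : Int) :: presums 0 t) i 0 = d then cnt + 1 else cnt) 0
    = wcount s n.toNat m.toNat d
  have hget : ∀ (k : Nat), k ≤ n.toNat →
      PySem.List.pyGetD ((0 : Int) :: presums 0 t) (k : Int) 0 = (t.take k).sum := by
    intro k hk
    rw [PySem.List.pyGetD_natCast, presums_get t 0 k (by omega)]
    ring
  rw [foldl_count_int (fun i => PySem.List.pyGetD ((0 : Int) :: presums 0 t) (min (i + m) n) 0
             - PySem.List.pyGetD ((0 : Int) :: presums 0 t) i 0 = d)]
  rw [PySem.List.pyRange_one, List.countP_map]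
  simp only [zero_add, wcount]
  rw [show ((n : Int) - 0).toNat = n.toNat by omega]
  congr 1
  apply List.countP_congr
  intro j hj
  have hjN : j < n.toNat := List.mem_range.mp hj
  simp only [Function.comp_apply, zero_add]
  have hJint : ((min (j + m.toNat) n.toNat : Nat) : Int) = min ((j : Int) + m) n := by
    push_cast; omega
  have hgj : PySem.List.pyGetD ((0 : Int) :: presums 0 t) (j : Int) 0 = (t.take j).sum :=
    hget j (by omega)
  have hgJ : PySem.List.pyGetD ((0 : Int) :: presums 0 t) (min ((j : Int) + m) n) 0
      = (t.take (min (j + m.toNat) n.toNat)).sum := by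
    rw [← hJint]; exact hget _ (by omega)
  have key : (t.take (min (j + m.toNat) n.toNat)).sum - (t.take j).sum
      = wsum s n.toNat m.toNat j := by
    set J : Nat := min (j + m.toNat) n.toNat with hJ
    have hjJ : j ≤ J := by omega
    have hsplit : t.take J = t.take j ++ (t.drop j).take (J - j) := by
      rw [show J = j + (J - j) by omega, List.take_add, Nat.add_sub_cancel_left]
    have hdt : (t.drop j).take (J - j) = (s.drop j).take (J - j) := by
      rw [ht, List.drop_take, List.take_take]
      congr 1
      omega
    rw [hsplit, List.sum_append, hdt]
    rw [wsum, show min (j + m.toNat) n.toNat - j = J - j by omega]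
    ring
  rw [hgj, hgJ, key]

-- ===== VERDICT (by name: the statement is the Claim_ definition above) =====
theorem solve_spec : Claim_equal_solve := by
  intro n s d m _hdom hpre
  unfold Spec_solve
  by_cases hn0 : n ≤ 0
  · rw [solve, solve_alt, PySem.List.pyRange_one_eq_nil (by omega), if_pos hn0]
    simp
  · by_cases hm0 : m ≤ 0
    · rw [solve_alt, if_neg hn0, if_pos hm0]
      rw [solve_eq_wcount n s d m (by intro h; omega) (by omega)]
      have hM : m.toNat = 0 := by omega
      unfold wcount
      have hcongr : ∀ i ∈ List.range n.toNat, decide (wsum s n.toNat m.toNat i = d) = true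
            ↔ decide ((0:Int) = d) = true := by
        intro i hi
        have hiN : i < n.toNat := List.mem_range.mp hi
        have hw : min (i + m.toNat) n.toNat - i = 0 := by omega
        simp [wsum, hM, hw]
      rw [List.countP_congr hcongr]
      by_cases hd : d = 0 <;> simp [hd] <;> omega
    · rw [solve_eq_wcount n s d m (fun h => hpre (by omega) h) (by omega),
          solve_alt_eq_wcount n s d m (hpre (by omega) (by omega)) (by omega) (by omega)]
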